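-- pv_equiv track=rewrite | github.com/vilobhmm/agents | agents/career/product_manager/prioritization.py | kano_classify
-- ===== SOURCE A (Python) =====
-- from typing import Dict, List, Optional
--
-- def kano_classify(
--
--     features: List[Dict],
-- ) -> Dict[str, List[Dict]]:
--     """
--     Classify features using the Kano Model.
--
--     Args:
--         features: List of dicts with keys:
--             - name (str)
--             - functional (str): reaction when feature is present
--               ("like", "expect", "neutral", "tolerate", "dislike")
--             - dysfunctional (str): reaction when feature is absent
--               ("like", "expect", "neutral", "tolerate", "dislike")
--
--     Returns:
--         Features classified as: must_be, performance, attractive, indifferent, reverse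
--     """
--     # Kano evaluation table
--     kano_table = {
--         ("like", "dislike"): "attractive",
--         ("like", "tolerate"): "attractive",
--         ("like", "neutral"): "attractive",
--         ("like", "expect"): "performance",
--         ("expect", "dislike"): "must_be",
--         ("expect", "tolerate"): "must_be",
--         ("expect", "neutral"): "indifferent",
--         ("neutral", "dislike"): "must_be",
--         ("neutral", "neutral"): "indifferent",
--         ("dislike", "like"): "reverse",
--         ("tolerate", "like"): "reverse",
--     }
--
--     result = {
--         "must_be": [],
--         "performance": [],
--         "attractive": [],
--         "indifferent": [],
--         "reverse": [],
--     }
--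
--     for f in features:
--         func = f.get("functional", "neutral").lower()
--         dysfunc = f.get("dysfunctional", "neutral").lower()
--         category = kano_table.get((func, dysfunc), "indifferent")
--
--         result[category].append({
--             "name": f.get("name", ""),
--             "functional": func,
--             "dysfunctional": dysfunc,
--         })
--
--     return result
-- ===== SOURCE B (Python) =====
-- def _classify(func, dysfunc):
--     # Kano rules as explicit decision logic instead of a lookup table.
--     if func == "like":
--         if dysfunc == "expect":
--             return "performance"
--         if dysfunc in ("dislike", "tolerate", "neutral"):
--             return "attractive"
--     elif func == "expect":
--         if dysfunc in ("dislike", "tolerate"):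
--             return "must_be"
--     elif func == "neutral":
--         if dysfunc == "dislike":
--             return "must_be"
--     elif func in ("dislike", "tolerate"):
--         if dysfunc == "like":
--             return "reverse"
--     return "indifferent"
--
--
-- def kano_classify(features):
--     cleaned = [{"name": f.get("name", ""),
--                 "functional": f.get("functional", "neutral").lower(),
--                 "dysfunctional": f.get("dysfunctional", "neutral").lower()}
--                for f in features]
--     return {cat: [c for c in cleaned
--                   if _classify(c["functional"], c["dysfunctional"]) == cat]
--             for cat in ("must_be", "performance", "attractive", "indifferent", "reverse")}
-- ===== Notes on version B (the rewrite author's own statement) =====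
-- stated objective: alternative
-- what changed: Replaces the lookup-table dict plus single dispatch loop with explicit if/elif decision logic for classification, a separate up-front cleaning pass, and one filtered pass per category over the cleaned list (inverted control flow, five passes, no table).
import Mathlib
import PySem

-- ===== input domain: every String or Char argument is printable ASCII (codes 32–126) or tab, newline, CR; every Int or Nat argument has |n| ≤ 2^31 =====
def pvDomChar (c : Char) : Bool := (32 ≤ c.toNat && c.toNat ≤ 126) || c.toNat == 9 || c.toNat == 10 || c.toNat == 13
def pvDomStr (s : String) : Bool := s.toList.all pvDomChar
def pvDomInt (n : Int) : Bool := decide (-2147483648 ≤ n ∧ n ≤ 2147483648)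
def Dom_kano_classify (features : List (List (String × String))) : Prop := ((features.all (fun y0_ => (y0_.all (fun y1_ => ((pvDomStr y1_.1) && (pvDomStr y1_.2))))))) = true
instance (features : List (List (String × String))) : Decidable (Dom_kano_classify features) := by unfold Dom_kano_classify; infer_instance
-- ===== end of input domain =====

-- B drops the lookup table and the single dispatch loop: it cleans every feature once, classifies with explicit decision logic, and builds the result by one filtered pass per category (alternative decomposition, same results).

-- ===== PORT A =====
def kanoTableA : PySem.Dict (String × String) String := PySem.Dict.mk
  [ (("like", "dislike"), "attractive"), (("like", "tolerate"), "attractive"),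
    (("like", "neutral"), "attractive"), (("like", "expect"), "performance"),
    (("expect", "dislike"), "must_be"), (("expect", "tolerate"), "must_be"),
    (("expect", "neutral"), "indifferent"), (("neutral", "dislike"), "must_be"),
    (("neutral", "neutral"), "indifferent"), (("dislike", "like"), "reverse"),
    (("tolerate", "like"), "reverse") ]

-- result[category].append(e) is ported as modify with default []; category is always one of result's five keys, so the default is never used.
def kano_classify (features : List (List (String × String))) : List (String × List (List (String × String))) :=
  (features.foldl
    (fun result f =>
      let func := PySem.Str.lower ((PySem.Dict.mk f).getD "functional" "neutral")
      let dysfunc := PySem.Str.lower ((PySem.Dict.mk f).getD "dysfunctional" "neutral")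
      let category := kanoTableA.getD (func, dysfunc) "indifferent"
      let entry : List (String × String) :=
        [("name", (PySem.Dict.mk f).getD "name" ""), ("functional", func), ("dysfunctional", dysfunc)]
      result.modify category [] (· ++ [entry]))
    (PySem.Dict.mk [("must_be", []), ("performance", []), ("attractive", []), ("indifferent", []), ("reverse", [])])).items

-- ===== PORT B =====
-- _classify: the Kano rules as explicit decision logic (no table)
def kanoClassifyPair (func dysfunc : String) : String :=
  if func == "like" then
    (if dysfunc == "expect" then "performance"
     else if dysfunc == "dislike" || dysfunc == "tolerate" || dysfunc == "neutral" then "attractive"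
     else "indifferent")
  else if func == "expect" then
    (if dysfunc == "dislike" || dysfunc == "tolerate" then "must_be" else "indifferent")
  else if func == "neutral" then
    (if dysfunc == "dislike" then "must_be" else "indifferent")
  else if func == "dislike" || func == "tolerate" then
    (if dysfunc == "like" then "reverse" else "indifferent")
  else "indifferent"

def kanoClean (f : List (String × String)) : List (String × String) :=
  [("name", (PySem.Dict.mk f).getD "name" ""),
   ("functional", PySem.Str.lower ((PySem.Dict.mk f).getD "functional" "neutral")),
   ("dysfunctional", PySem.Str.lower ((PySem.Dict.mk f).getD "dysfunctional" "neutral"))]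

-- c["functional"] / c["dysfunctional"] always exist in a cleaned entry; getD with "" is exact here
def kano_classify_alt (features : List (List (String × String))) : List (String × List (List (String × String))) :=
  let cleaned := features.map kanoClean
  (["must_be", "performance", "attractive", "indifferent", "reverse"] : List String).map
    (fun cat =>
      (cat, cleaned.filter (fun c =>
        kanoClassifyPair ((PySem.Dict.mk c).getD "functional" "") ((PySem.Dict.mk c).getD "dysfunctional" "") == cat)))

-- ===== PRECONDITION & SPEC =====
def Spec_kano_classify (features : List (List (String × String))) (out : List (String × List (List (String × String)))) : Prop := out = kano_classify_alt features
instance (features : List (List (String × String))) (out : List (String × List (List (String × String)))) : Decidable (Spec_kano_classify features out) := by unfold Spec_kano_classify; infer_instance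

-- ===== CLAIM (what is proved, stated in full; the proofs are below) =====
def Claim_equal_kano_classify : Prop := ∀ (features : List (List (String × String))), Dom_kano_classify features → Spec_kano_classify features (kano_classify features)

-- ===== LEMMAS AND PROOFS =====

-- A's table lookup (default "indifferent") agrees with B's decision logic on all strings
set_option maxHeartbeats 1600000 in
set_option maxRecDepth 8000 in
theorem kano_table_eq (u v : String) :
    kanoTableA.getD (u, v) "indifferent" = kanoClassifyPair u v := by
  have hp : ∀ (a b c d : String), ((a, b) == (c, d)) = (a == c && b == d) := fun _ _ _ _ => rfl
  have h0 : (PySem.Dict.mk ([] : List ((String × String) × String))).get? (u, v) = none := rfl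
  simp only [kanoTableA, kanoClassifyPair, PySem.Dict.getD_eq_get?_getD,
    PySem.Dict.get?_mk_cons, h0, hp, beq_iff_eq, Bool.and_eq_true,
    Bool.or_eq_true]
  split_ifs <;> subst_vars <;> simp_all <;>
    (first
      | (rename_i hd _ _ _; rcases hd with h | h <;> simp_all)
      | (rename_i hd _ _ _ _; rcases hd with (h | h) | h <;> simp_all)
      | (rename_i hd _ _; rcases hd with h | h <;> simp_all))

-- classifying a cleaned entry = classifying the original feature's normalized fields
theorem kano_clean_fields (f : List (String × String)) :
    ((PySem.Dict.mk (kanoClean f)).getD "functional" ""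
      = PySem.Str.lower ((PySem.Dict.mk f).getD "functional" "neutral")) ∧
    ((PySem.Dict.mk (kanoClean f)).getD "dysfunctional" ""
      = PySem.Str.lower ((PySem.Dict.mk f).getD "dysfunctional" "neutral")) := by
  constructor <;> rfl

-- the per-feature category, in B's terms
def kanoCatOf (f : List (String × String)) : String :=
  kanoClassifyPair (PySem.Str.lower ((PySem.Dict.mk f).getD "functional" "neutral"))
    (PySem.Str.lower ((PySem.Dict.mk f).getD "dysfunctional" "neutral"))

theorem kanoCatOf_mem (f : List (String × String)) :
    kanoCatOf f = "must_be" ∨ kanoCatOf f = "performance" ∨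
    kanoCatOf f = "attractive" ∨ kanoCatOf f = "indifferent" ∨
    kanoCatOf f = "reverse" := by
  unfold kanoCatOf kanoClassifyPair
  split_ifs <;> simp

theorem kano_modify_mb {v : List (List (String × String))}
    (a b c d e : List (List (String × String))) :
    (PySem.Dict.mk [("must_be", a), ("performance", b), ("attractive", c), ("indifferent", d), ("reverse", e)]).modify "must_be" [] (· ++ v) =
    PySem.Dict.mk [("must_be", a ++ v), ("performance", b), ("attractive", c), ("indifferent", d), ("reverse", e)] := rfl

theorem kano_modify_perf {v : List (List (String × String))}
    (a b c d e : List (List (String × String))) :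
    (PySem.Dict.mk [("must_be", a), ("performance", b), ("attractive", c), ("indifferent", d), ("reverse", e)]).modify "performance" [] (· ++ v) =
    PySem.Dict.mk [("must_be", a), ("performance", b ++ v), ("attractive", c), ("indifferent", d), ("reverse", e)] := rfl

theorem kano_modify_attr {v : List (List (String × String))}
    (a b c d e : List (List (String × String))) :
    (PySem.Dict.mk [("must_be", a), ("performance", b), ("attractive", c), ("indifferent", d), ("reverse", e)]).modify "attractive" [] (· ++ v) =
    PySem.Dict.mk [("must_be", a), ("performance", b), ("attractive", c ++ v), ("indifferent", d), ("reverse", e)] := rfl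

theorem kano_modify_ind {v : List (List (String × String))}
    (a b c d e : List (List (String × String))) :
    (PySem.Dict.mk [("must_be", a), ("performance", b), ("attractive", c), ("indifferent", d), ("reverse", e)]).modify "indifferent" [] (· ++ v) =
    PySem.Dict.mk [("must_be", a), ("performance", b), ("attractive", c), ("indifferent", d ++ v), ("reverse", e)] := rfl

theorem kano_modify_rev {v : List (List (String × String))}
    (a b c d e : List (List (String × String))) :
    (PySem.Dict.mk [("must_be", a), ("performance", b), ("attractive", c), ("indifferent", d), ("reverse", e)]).modify "reverse" [] (· ++ v) =
    PySem.Dict.mk [("must_be", a), ("performance", b), ("attractive", c), ("indifferent", d), ("reverse", e ++ v)] := rfl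

-- B's per-category filter over cleaned entries, pushed through the map
theorem kano_filter_map (fs : List (List (String × String))) (cat : String) :
    (fs.map kanoClean).filter (fun c =>
        kanoClassifyPair ((PySem.Dict.mk c).getD "functional" "") ((PySem.Dict.mk c).getD "dysfunctional" "") == cat)
      = (fs.filter (fun f => kanoCatOf f == cat)).map kanoClean := by
  induction fs with
  | nil => rfl
  | cons f fs ih =>
    simp only [List.map_cons, List.filter_cons, (kano_clean_fields f).1, (kano_clean_fields f).2]
    show (if (kanoCatOf f == cat) = true then _ else _) = _
    split_ifs with h <;> simp [ih]

-- loop invariant: A's fold over any five-accumulator state equals B's per-category filters appended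
theorem kano_fold_inv (fs : List (List (String × String)))
    (a b c d e : List (List (String × String))) :
    fs.foldl
      (fun result f =>
        let func := PySem.Str.lower ((PySem.Dict.mk f).getD "functional" "neutral")
        let dysfunc := PySem.Str.lower ((PySem.Dict.mk f).getD "dysfunctional" "neutral")
        let category := kanoTableA.getD (func, dysfunc) "indifferent"
        let entry : List (String × String) :=
          [("name", (PySem.Dict.mk f).getD "name" ""), ("functional", func), ("dysfunctional", dysfunc)]
        result.modify category [] (· ++ [entry]))
      (PySem.Dict.mk [("must_be", a), ("performance", b), ("attractive", c), ("indifferent", d), ("reverse", e)]) =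
    PySem.Dict.mk
      [("must_be", a ++ (fs.filter (fun f => kanoCatOf f == "must_be")).map kanoClean),
       ("performance", b ++ (fs.filter (fun f => kanoCatOf f == "performance")).map kanoClean),
       ("attractive", c ++ (fs.filter (fun f => kanoCatOf f == "attractive")).map kanoClean),
       ("indifferent", d ++ (fs.filter (fun f => kanoCatOf f == "indifferent")).map kanoClean),
       ("reverse", e ++ (fs.filter (fun f => kanoCatOf f == "reverse")).map kanoClean)] := by
  induction fs generalizing a b c d e with
  | nil => simp
  | cons f fs ih =>
    have hcat : kanoTableA.getD
        (PySem.Str.lower ((PySem.Dict.mk f).getD "functional" "neutral"),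
         PySem.Str.lower ((PySem.Dict.mk f).getD "dysfunctional" "neutral")) "indifferent"
        = kanoCatOf f := kano_table_eq _ _
    have hentry : ([("name", (PySem.Dict.mk f).getD "name" ""),
        ("functional", PySem.Str.lower ((PySem.Dict.mk f).getD "functional" "neutral")),
        ("dysfunctional", PySem.Str.lower ((PySem.Dict.mk f).getD "dysfunctional" "neutral"))] : List (String × String))
        = kanoClean f := rfl
    simp only [List.foldl_cons, List.filter_cons, hcat, hentry]
    rcases kanoCatOf_mem f with h | h | h | h | h <;>
      rw [h] <;>
      [rw [kano_modify_mb]; rw [kano_modify_perf]; rw [kano_modify_attr];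
       rw [kano_modify_ind]; rw [kano_modify_rev]] <;>
      rw [ih] <;>
      simp

-- ===== VERDICT (by name: the statement is the Claim_ definition above) =====
theorem kano_classify_spec : Claim_equal_kano_classify := by
  intro features _
  show kano_classify features = kano_classify_alt features
  unfold kano_classify kano_classify_alt
  rw [kano_fold_inv]
  simp [kano_filter_map]
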